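-- pv_equiv track=rewrite | github.com/Hulyamr13/hackerrank | Coinage.py | calculate_ways
-- ===== SOURCE A (Python) =====
-- def calculate_ways(n, a, b, c, d):
--     ans = 0
--     for i in range(min(d, n // 10) + 1):
--         for j in range(min(c, n // 5) + 1):
--             for k in range(min(b, n // 2) + 1):
--                 if 0 <= (n - 10 * i - 5 * j - 2 * k) <= a:
--                     ans += 1
--     return ans
-- ===== SOURCE B (Python) =====
-- def calculate_ways(n, a, b, c, d):
--     kmax = min(b, n // 2)
--     ans = 0
--     for i in range(min(d, n // 10) + 1):
--         for j in range(min(c, n // 5) + 1):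
--             m = n - 10 * i - 5 * j
--             lo = max(0, -((a - m) // 2))
--             hi = min(kmax, m // 2)
--             if lo <= hi:
--                 ans += hi - lo + 1
--     return ans
-- ===== Notes on version B (the rewrite author's own statement) =====
-- stated objective: faster
-- what changed: The innermost k-loop is replaced by a closed-form count of the valid k per (i,j), obtained by intersecting [0, min(b, n//2)] with [ceil((m-a)/2), floor(m/2)].
import Mathlib
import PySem

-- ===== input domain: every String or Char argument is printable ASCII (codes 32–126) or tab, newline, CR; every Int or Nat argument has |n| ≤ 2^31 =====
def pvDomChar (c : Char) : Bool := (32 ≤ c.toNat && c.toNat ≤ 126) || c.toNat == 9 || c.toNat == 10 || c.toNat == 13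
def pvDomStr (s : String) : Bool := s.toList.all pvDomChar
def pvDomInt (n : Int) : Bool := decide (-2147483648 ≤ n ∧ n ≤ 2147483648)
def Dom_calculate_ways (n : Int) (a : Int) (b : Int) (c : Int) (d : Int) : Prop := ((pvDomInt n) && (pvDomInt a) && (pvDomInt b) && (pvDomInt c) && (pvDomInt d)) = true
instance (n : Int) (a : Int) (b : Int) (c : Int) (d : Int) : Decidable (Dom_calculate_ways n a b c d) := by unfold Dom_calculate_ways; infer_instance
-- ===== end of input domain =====

-- B replaces A's innermost k-loop by a closed-form interval-intersection count (O(d·c) instead of O(d·c·b)); asymptotically faster.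

-- ===== PORT A =====
def calculate_ways (n : Int) (a : Int) (b : Int) (c : Int) (d : Int) : Int :=
  (PySem.List.pyRange 0 (min d (PySem.Int.floordiv n 10) + 1)).foldl (fun ans i =>
    (PySem.List.pyRange 0 (min c (PySem.Int.floordiv n 5) + 1)).foldl (fun ans j =>
      (PySem.List.pyRange 0 (min b (PySem.Int.floordiv n 2) + 1)).foldl (fun ans k =>
        if 0 ≤ n - 10 * i - 5 * j - 2 * k ∧ n - 10 * i - 5 * j - 2 * k ≤ a then ans + 1 else ans)
        ans) ans) 0

-- ===== PORT B =====
def calculate_ways_alt (n : Int) (a : Int) (b : Int) (c : Int) (d : Int) : Int :=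
  let kmax := min b (PySem.Int.floordiv n 2)
  (PySem.List.pyRange 0 (min d (PySem.Int.floordiv n 10) + 1)).foldl (fun ans i =>
    (PySem.List.pyRange 0 (min c (PySem.Int.floordiv n 5) + 1)).foldl (fun ans j =>
      let m := n - 10 * i - 5 * j
      let lo := max 0 (-(PySem.Int.floordiv (a - m) 2))
      let hi := min kmax (PySem.Int.floordiv m 2)
      if lo ≤ hi then ans + (hi - lo + 1) else ans) ans) 0

-- ===== PRECONDITION & SPEC =====
def Spec_calculate_ways (n : Int) (a : Int) (b : Int) (c : Int) (d : Int) (out : Int) : Prop := out = calculate_ways_alt n a b c d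
instance (n : Int) (a : Int) (b : Int) (c : Int) (d : Int) (out : Int) : Decidable (Spec_calculate_ways n a b c d out) := by unfold Spec_calculate_ways; infer_instance

-- ===== CLAIM (what is proved, stated in full; the proofs are below) =====
def Claim_equal_calculate_ways : Prop := ∀ (n : Int) (a : Int) (b : Int) (c : Int) (d : Int), Dom_calculate_ways n a b c d → Spec_calculate_ways n a b c d (calculate_ways n a b c d)

-- ===== LEMMAS AND PROOFS =====

-- floor-division-by-2 bracket, feeding omega
theorem pv_fd2 (x : Int) : 2 * PySem.Int.floordiv x 2 ≤ x ∧ x < 2 * PySem.Int.floordiv x 2 + 2 := by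
  have h := PySem.Int.floordiv_mul_add_mod x 2
  have h1 := PySem.Int.mod_nonneg x (b := 2) (by norm_num)
  have h2 := PySem.Int.mod_lt x (b := 2) (by norm_num)
  omega

theorem pv_pyRange_nil {t : Int} (h : t ≤ 0) : PySem.List.pyRange 0 t = ([] : List Int) := by
  simp [PySem.List.pyRange, h]

-- A's k-loop over range(t+1) equals the closed-form interval-intersection count, for t a Nat
theorem pv_inner_nat (m a : Int) (t : Nat) (acc : Int) :
    (PySem.List.pyRange 0 ((t : Int) + 1)).foldl
      (fun ans k => if 0 ≤ m - 2 * k ∧ m - 2 * k ≤ a then ans + 1 else ans) acc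
    = (if max 0 (-(PySem.Int.floordiv (a - m) 2)) ≤ min (t : Int) (PySem.Int.floordiv m 2)
       then acc + (min (t : Int) (PySem.Int.floordiv m 2) - max 0 (-(PySem.Int.floordiv (a - m) 2)) + 1)
       else acc) := by
  induction t generalizing acc with
  | zero =>
      have h1 := pv_fd2 m
      have h2 := pv_fd2 (a - m)
      rw [show (((0:Nat) : Int) + 1) = (0:Int) + 1 by norm_num,
          PySem.List.pyRange_one_succ_right (le_refl (0:Int)), pv_pyRange_nil (le_refl 0)]
      simp only [List.nil_append, List.foldl_cons, List.foldl_nil]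
      split_ifs <;> omega
  | succ t ih =>
      have h0 : (0:Int) ≤ (t : Int) + 1 := by positivity
      rw [show (((t + 1 : Nat)) : Int) + 1 = ((t : Int) + 1) + 1 by push_cast; ring,
          PySem.List.pyRange_one_succ_right h0, List.foldl_append, ih]
      have h1 := pv_fd2 m
      have h2 := pv_fd2 (a - m)
      simp only [List.foldl_cons, List.foldl_nil]
      split_ifs <;> omega

-- the k-loop equals B's closed form for every Int bound kmax
theorem pv_inner (m a kmax acc : Int) :
    (PySem.List.pyRange 0 (kmax + 1)).foldl
      (fun ans k => if 0 ≤ m - 2 * k ∧ m - 2 * k ≤ a then ans + 1 else ans) acc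
    = (if max 0 (-(PySem.Int.floordiv (a - m) 2)) ≤ min kmax (PySem.Int.floordiv m 2)
       then acc + (min kmax (PySem.Int.floordiv m 2) - max 0 (-(PySem.Int.floordiv (a - m) 2)) + 1)
       else acc) := by
  by_cases hk : 0 ≤ kmax
  · have : kmax = ((kmax.toNat : Nat) : Int) := by omega
    rw [this]; exact pv_inner_nat m a kmax.toNat acc
  · rw [pv_pyRange_nil (by omega : kmax + 1 ≤ 0)]
    have : ¬ (max 0 (-(PySem.Int.floordiv (a - m) 2)) ≤ min kmax (PySem.Int.floordiv m 2)) := by omega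
    simp only [List.foldl_nil, if_neg this]

-- ===== VERDICT (by name: the statement is the Claim_ definition above) =====
theorem calculate_ways_spec : Claim_equal_calculate_ways := by
  intro n a b c d _
  show calculate_ways n a b c d = calculate_ways_alt n a b c d
  unfold calculate_ways calculate_ways_alt
  congr 1
  funext ans i
  congr 1
  funext ans j
  exact pv_inner (n - 10 * i - 5 * j) a (min b (PySem.Int.floordiv n 2)) ans
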